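-- pv_equiv track=rewrite | github.com/yakneens/rosalind | old/cyclopeptide_sequencing.py | generateSpectrum
-- ===== SOURCE A (Python) =====
-- def generateAllSubPeptides(peptide):
--     peplen = len(peptide)
--     my_list = []
--     for i in range(0,peplen):
--         for j in range(1,peplen):
--             my_list.append(peptide[0:j])
--
--
--         first_part_list = list(peptide[1:])
--         first_part_list.append(peptide[0])
--         peptide = first_part_list
--
--     my_list.append([])
--     my_list.append(peptide)
--     return my_list
--
-- def generateAllLinearSubPeptides(peptide):
--     peplen = len(peptide)
--     my_list = []
--     for i in range(0,peplen):
--         for j in range(i+1,peplen+1):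
--             my_list.append(peptide[i:j])
--
--     my_list.append([])
--
--     return my_list
--
-- def generateSpectrum(peptide, isCircular):
--     spectrum = []
--     subpeptide_list = []
--
--     if isCircular:
--         subpeptide_list = generateAllSubPeptides(peptide)
--     else:
--         subpeptide_list = generateAllLinearSubPeptides(peptide)
--
--     for p in subpeptide_list:
--         spectrum.append(sum([c for c in p]))
--
--     return spectrum
-- ===== SOURCE B (Python) =====
-- def generateSpectrum(peptide, isCircular):
--     n = len(peptide)
--     pre = [0]
--     for x in (peptide + peptide) if isCircular else peptide:
--         pre.append(pre[-1] + x)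
--     if isCircular:
--         spectrum = [pre[i + j] - pre[i] for i in range(n) for j in range(1, n)]
--         spectrum.append(0)
--         spectrum.append(pre[n])
--     else:
--         spectrum = [pre[j] - pre[i] for i in range(n) for j in range(i + 1, n + 1)]
--         spectrum.append(0)
--     return spectrum
-- ===== Notes on version B (the rewrite author's own statement) =====
-- stated objective: faster
-- what changed: B computes one prefix-sum array (over the doubled peptide for the circular case) and emits each sub-peptide mass as a difference of two prefix sums in O(1), instead of A's materialising every sub-peptide slice (rotating the whole peptide n times in the circular case) and summing each slice element by element.
import Mathlib
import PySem

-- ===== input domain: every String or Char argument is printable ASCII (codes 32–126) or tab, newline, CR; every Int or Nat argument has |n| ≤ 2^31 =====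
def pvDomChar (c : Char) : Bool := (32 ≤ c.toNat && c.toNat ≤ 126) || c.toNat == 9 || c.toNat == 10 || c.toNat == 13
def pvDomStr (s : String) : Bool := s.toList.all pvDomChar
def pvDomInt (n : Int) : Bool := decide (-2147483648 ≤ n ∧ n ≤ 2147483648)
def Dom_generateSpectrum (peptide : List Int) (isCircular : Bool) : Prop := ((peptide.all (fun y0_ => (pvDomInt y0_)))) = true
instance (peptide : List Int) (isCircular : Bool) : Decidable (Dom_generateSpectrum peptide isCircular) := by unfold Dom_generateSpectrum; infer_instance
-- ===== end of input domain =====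

-- B replaces A's cubic "materialise every sub-peptide slice, then sum each" with prefix sums
-- (over the doubled list for the circular case), emitting each sub-peptide mass in O(1), same order.

-- ===== PORT A =====
def generateAllSubPeptides (peptide : List Int) : List (List Int) :=
  let peplen : Int := PySem.List.len peptide
  let st := (PySem.List.pyRange 0 peplen 1).foldl
    (fun (st : List (List Int) × List Int) _i =>
      let my_list := (PySem.List.pyRange 1 peplen 1).foldl
        (fun my_list j => my_list ++ [PySem.List.slice st.2 (some 0) (some j)]) st.1
      -- peptide[1:] + [peptide[0]]: st.2 is nonempty whenever this body runs (its length stays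
      -- peplen > 0 inside the loop), so pyGetD with a default is exact for peptide[0] here
      let first_part_list := PySem.List.slice st.2 (some 1) none ++ [PySem.List.pyGetD st.2 0 0]
      (my_list, first_part_list))
    ([], peptide)
  (st.1 ++ [[]]) ++ [st.2]

def generateAllLinearSubPeptides (peptide : List Int) : List (List Int) :=
  let peplen : Int := PySem.List.len peptide
  ((PySem.List.pyRange 0 peplen 1).foldl
    (fun my_list i =>
      (PySem.List.pyRange (i + 1) (peplen + 1) 1).foldl
        (fun my_list j => my_list ++ [PySem.List.slice peptide (some i) (some j)]) my_list)
    []) ++ [[]]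

def generateSpectrum (peptide : List Int) (isCircular : Bool) : List Int :=
  let subpeptide_list :=
    if isCircular then generateAllSubPeptides peptide
    else generateAllLinearSubPeptides peptide
  subpeptide_list.foldl (fun spectrum p => spectrum ++ [(p.map (fun c => c)).sum]) []

-- ===== PORT B =====
def generateSpectrum_alt (peptide : List Int) (isCircular : Bool) : List Int :=
  let n : Int := PySem.List.len peptide
  let pre := (if isCircular then peptide ++ peptide else peptide).foldl
    (fun pre x => pre ++ [PySem.List.pyGetD pre (-1) 0 + x]) [(0 : Int)]
  if isCircular then
    ((PySem.List.pyRange 0 n 1).flatMap (fun i =>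
      (PySem.List.pyRange 1 n 1).map (fun j =>
        PySem.List.pyGetD pre (i + j) 0 - PySem.List.pyGetD pre i 0)))
    ++ [0, PySem.List.pyGetD pre n 0]
  else
    ((PySem.List.pyRange 0 n 1).flatMap (fun i =>
      (PySem.List.pyRange (i + 1) (n + 1) 1).map (fun j =>
        PySem.List.pyGetD pre j 0 - PySem.List.pyGetD pre i 0)))
    ++ [0]

-- ===== PRECONDITION & SPEC =====
def Spec_generateSpectrum (peptide : List Int) (isCircular : Bool) (out : List Int) : Prop := out = generateSpectrum_alt peptide isCircular
instance (peptide : List Int) (isCircular : Bool) (out : List Int) : Decidable (Spec_generateSpectrum peptide isCircular out) := by unfold Spec_generateSpectrum; infer_instance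

-- ===== CLAIM (what is proved, stated in full; the proofs are below) =====
def Claim_equal_generateSpectrum : Prop := ∀ (peptide : List Int) (isCircular : Bool), Dom_generateSpectrum peptide isCircular → Spec_generateSpectrum peptide isCircular (generateSpectrum peptide isCircular)

-- ===== LEMMAS AND PROOFS =====

-- B's prefix-sum accumulator, named for the proofs
def prefixFold (L : List Int) : List Int :=
  L.foldl (fun pre x => pre ++ [PySem.List.pyGetD pre (-1) 0 + x]) [(0 : Int)]

lemma prefixFold_eq (L : List Int) :
    prefixFold L = (List.range (L.length + 1)).map (fun k => (L.take k).sum) := by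
  induction L using List.reverseRecOn with
  | nil => rfl
  | append_singleton L x ih =>
    have hlast : PySem.List.pyGetD
        ((List.range (L.length + 1)).map (fun k => (L.take k).sum)) (-1) 0 = L.sum := by
      rw [List.range_succ, List.map_append]
      simp [PySem.List.pyGetD_neg_one_append_singleton]
    have hstep : prefixFold (L ++ [x]) =
        prefixFold L ++ [PySem.List.pyGetD (prefixFold L) (-1) 0 + x] := by
      simp [prefixFold, List.foldl_append]
    have key : (List.range (L.length + 1 + 1)).map (fun k => ((L ++ [x]).take k).sum)
        = (List.range (L.length + 1)).map (fun k => (L.take k).sum) ++ [L.sum + x] := by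
      rw [List.range_succ, List.map_append]
      congr 1
      · apply List.map_congr_left
        intro k hk
        rw [List.mem_range] at hk
        rw [List.take_append_of_le_length (by omega)]
      · simp
    rw [hstep, ih, hlast, show (L ++ [x]).length = L.length + 1 from by simp, key]

lemma preAt (L : List Int) (i : Int) (h0 : 0 ≤ i) (h1 : i.toNat ≤ L.length) :
    PySem.List.pyGetD (prefixFold L) i 0 = (L.take i.toNat).sum := by
  rw [prefixFold_eq]
  obtain ⟨m, rfl⟩ : ∃ m : Nat, i = (m : Int) := ⟨i.toNat, (Int.toNat_of_nonneg h0).symm⟩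
  simp only [Int.toNat_natCast] at h1 ⊢
  simp [List.getD, List.getElem?_map, List.getElem?_range (by omega : m < L.length + 1)]

lemma sum_take_sub (xs : List Int) (a b : Nat) (h : a ≤ b) :
    ((xs.drop a).take (b - a)).sum = (xs.take b).sum - (xs.take a).sum := by
  obtain ⟨c, rfl⟩ : ∃ c, b = a + c := ⟨b - a, by omega⟩
  have hc : a + c - a = c := by omega
  rw [hc, List.take_add, List.sum_append]
  ring

-- rotation of the peptide after k steps of A's outer loop
def rotK (pep : List Int) (k : Nat) : List Int := pep.drop k ++ pep.take k

lemma rot_step (pep : List Int) (k : Nat) (hk : k < pep.length) :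
    PySem.List.slice (rotK pep k) (some 1) none ++ [PySem.List.pyGetD (rotK pep k) 0 0]
      = rotK pep (k + 1) := by
  have hcons : pep.drop k = pep[k] :: pep.drop (k + 1) := List.drop_eq_getElem_cons hk
  have htake : pep.take (k + 1) = pep.take k ++ [pep[k]] := by
    rw [List.take_add_one]
    simp [List.getElem?_eq_getElem hk]
  rw [rotK, rotK, hcons, htake, PySem.List.slice_from_one]
  simp only [List.cons_append, List.tail_cons, PySem.List.pyGetD_zero_cons, List.append_assoc]

-- the sum of a wrapped slice, via prefix sums over the doubled peptide
lemma circ_slice_sum (pep : List Int) (i j : Nat) (hi : i ≤ pep.length) (hj : j ≤ pep.length) :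
    ((rotK pep i).take j).sum
      = ((pep ++ pep).take (i + j)).sum - ((pep ++ pep).take i).sum := by
  rw [← sum_take_sub (pep ++ pep) i (i + j) (by omega)]
  have hdrop : (pep ++ pep).drop i = pep.drop i ++ pep := by
    rw [List.drop_append_of_le_length hi]
  rw [hdrop, rotK, List.take_append, List.take_append]
  have : i + j - i = j := by omega
  rw [this]
  congr 2
  rw [List.length_drop, List.take_take, Nat.min_eq_left (by omega)]

-- a fold whose step ignores the list element is an iterate
lemma foldl_ignore_elem {α σ : Type} (l : List α) (g : σ → σ) (init : σ) :
    l.foldl (fun st _ => g st) init = g^[l.length] init := by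
  induction l generalizing init with
  | nil => rfl
  | cons x xs ih => simp [List.foldl_cons, ih, Function.iterate_succ_apply]

-- A's circular outer-loop body, as a state transformer
def stepG (n : Int) : List (List Int) × List Int → List (List Int) × List Int :=
  fun st =>
    ((PySem.List.pyRange 1 n 1).foldl
        (fun my_list j => my_list ++ [PySem.List.slice st.2 (some 0) (some j)]) st.1,
     PySem.List.slice st.2 (some 1) none ++ [PySem.List.pyGetD st.2 0 0])

-- the sub-peptide list A has accumulated after k circular iterations
def specL (pep : List Int) (k : Nat) : List (List Int) :=
  (List.range k).flatMap (fun i =>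
    (PySem.List.pyRange 1 (PySem.List.len pep) 1).map
      (fun j => PySem.List.slice (rotK pep i) (some 0) (some j)))

lemma iterate_stepG (pep : List Int) (k : Nat) (hk : k ≤ pep.length) :
    (stepG (PySem.List.len pep))^[k] ([], pep) = (specL pep k, rotK pep k) := by
  induction k with
  | zero => simp [specL, rotK]
  | succ k ih =>
    rw [Function.iterate_succ_apply', ih (by omega)]
    unfold stepG
    rw [PySem.List.foldl_append_singleton_eq_map, rot_step pep k (by omega)]
    refine Prod.ext ?_ rfl
    show specL pep k ++ _ = specL pep (k + 1)
    unfold specL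
    rw [List.range_succ, List.flatMap_append]
    simp

lemma linear_case (pep : List Int) :
    generateSpectrum pep false = generateSpectrum_alt pep false := by
  unfold generateSpectrum generateSpectrum_alt generateAllLinearSubPeptides
  simp only [Bool.false_eq_true, if_false]
  simp only [PySem.List.foldl_append_singleton_eq_map, PySem.List.foldl_append_eq_flatMap,
    List.nil_append]
  rw [List.map_append, List.map_flatMap]
  congr 1
  apply List.flatMap_congr
  intro i hi
  rw [PySem.List.mem_pyRange_one] at hi
  rw [PySem.List.len_eq] at hi
  rw [List.map_map]
  apply List.map_congr_left
  intro j hj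
  rw [PySem.List.mem_pyRange_one] at hj
  rw [PySem.List.len_eq] at hj
  simp only [Function.comp]
  rw [PySem.List.slice_toNat pep (by omega) (by omega), List.map_id']
  rw [sum_take_sub pep i.toNat j.toNat (by omega)]
  show _ = PySem.List.pyGetD (prefixFold pep) j 0 - PySem.List.pyGetD (prefixFold pep) i 0
  rw [preAt pep j (by omega) (by omega), preAt pep i (by omega) (by omega)]

lemma circular_case (pep : List Int) :
    generateSpectrum pep true = generateSpectrum_alt pep true := by
  unfold generateSpectrum generateSpectrum_alt generateAllSubPeptides
  simp only [if_pos]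
  have hit := iterate_stepG pep pep.length le_rfl
  unfold stepG at hit
  rw [foldl_ignore_elem]
  rw [PySem.List.length_pyRange_one]
  simp only [sub_zero, PySem.List.len_eq, Int.toNat_natCast] at hit ⊢
  rw [hit]
  have hrot : rotK pep pep.length = pep := by simp [rotK]
  rw [hrot]
  simp only [PySem.List.foldl_append_singleton_eq_map, List.nil_append]
  rw [List.map_append, List.map_append]
  rw [show (List.foldl (fun pre x => pre ++ [PySem.List.pyGetD pre (-1) 0 + x])
        [(0 : Int)] (pep ++ pep)) = prefixFold (pep ++ pep) from rfl]
  rw [show ([0, PySem.List.pyGetD (prefixFold (pep ++ pep)) ((pep.length : Int)) 0] : List Int)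
      = [0] ++ [PySem.List.pyGetD (prefixFold (pep ++ pep)) ((pep.length : Int)) 0] from rfl]
  rw [← List.append_assoc]
  congr 1
  · congr 1
    unfold specL
    rw [List.map_flatMap, PySem.List.pyRange_one 0 ((pep.length : Int))]
    simp only [PySem.List.len_eq, sub_zero, Int.toNat_natCast, zero_add]
    rw [List.flatMap_map]
    apply List.flatMap_congr
    intro i hi
    rw [List.mem_range] at hi
    rw [List.map_map]
    apply List.map_congr_left
    intro j hj
    rw [PySem.List.mem_pyRange_one] at hj
    simp only [Function.comp, PySem.List.slice_zero_start]
    rw [PySem.List.slice_to _ (by omega), List.map_id']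
    rw [circ_slice_sum pep i j.toNat (by omega) (by omega)]
    rw [preAt (pep ++ pep) ((i : Int) + j) (by omega)
        (by rw [List.length_append]; omega)]
    rw [preAt (pep ++ pep) (i : Int) (by omega)
        (by rw [List.length_append]; omega)]
    rw [show ((i : Int) + j).toNat = i + j.toNat from by omega,
        show ((i : Int)).toNat = i from by omega]
  · rw [preAt (pep ++ pep) ((pep.length : Int)) (by omega)
        (by rw [List.length_append]; omega)]
    simp [List.map_id']

-- ===== VERDICT (by name: the statement is the Claim_ definition above) =====
theorem generateSpectrum_spec : Claim_equal_generateSpectrum := by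
  intro pep c _
  unfold Spec_generateSpectrum
  cases c
  · exact linear_case pep
  · exact circular_case pep
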